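-- pv_equiv track=rewrite | github.com/gordonwatts/func_adl_servicex_type_generator | func_adl_servicex_type_generator/package.py | normalize_cpp_type
-- ===== SOURCE A (Python) =====
-- from typing import Any, Dict, Iterable, List, Optional, Set, Tuple
--
-- def normalize_cpp_type(cpp_class_name: Optional[str]) -> Optional[str]:
--     """Normalize a C++ type for lookup (remove
--     extra spaces, etc.))
--
--     Args:
--         cpp_class_name (str): The C++ class name
--
--     Returns:
--         str: The normalized C++ class name
--     """
--     if cpp_class_name is None:
--         return None
--
--     result = cpp_class_name
--
--     def replace_till_done(s: str, old: str, new: str) -> str: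
--         while True:
--             n_result = s.replace(old, new)
--             if n_result == s:
--                 break
--             s = n_result
--         return s
--
--     result = replace_till_done(result, "  ", " ")
--     result = replace_till_done(result, "> >", ">>")
--     result = replace_till_done(result, "< <", "<<")
--
--     return result
-- ===== SOURCE B (Python) =====
-- from typing import Optional
--
--
-- def _collapse_spaces(s: str) -> str:
--     # single pass: drop a space whose next character is also a space
--     out = []
--     n = len(s)
--     for i in range(n):
--         if s[i] == ' ' and i + 1 < n and s[i + 1] == ' ':
--             continue
--         out.append(s[i])
--     return ''.join(out)
--
--
-- def _drop_between(s: str, ch: str) -> str: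
--     # single pass: "ch ' ' ch" -> emit ch and continue AT the second ch,
--     # so chains like "> > >" collapse in one scan
--     out = []
--     n = len(s)
--     i = 0
--     while i < n:
--         if s[i] == ch and i + 2 < n and s[i + 1] == ' ' and s[i + 2] == ch:
--             out.append(ch)
--             i += 2
--         else:
--             out.append(s[i])
--             i += 1
--     return ''.join(out)
--
--
-- def normalize_cpp_type(cpp_class_name: Optional[str]) -> Optional[str]:
--     if cpp_class_name is None:
--         return None
--     return _drop_between(_drop_between(_collapse_spaces(cpp_class_name), '>'), '<')
-- ===== Notes on version B (the rewrite author's own statement) =====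
-- stated objective: alternative
-- what changed: A's three replace-to-fixpoint while-loops (repeated full-string str.replace passes until nothing changes) are replaced by three single left-to-right scans: one drops each space whose successor is a space, and one per bracket kind drops the space of a bracket-space-bracket triple and resumes at the second bracket so whole chains collapse in one scan.
import Mathlib
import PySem

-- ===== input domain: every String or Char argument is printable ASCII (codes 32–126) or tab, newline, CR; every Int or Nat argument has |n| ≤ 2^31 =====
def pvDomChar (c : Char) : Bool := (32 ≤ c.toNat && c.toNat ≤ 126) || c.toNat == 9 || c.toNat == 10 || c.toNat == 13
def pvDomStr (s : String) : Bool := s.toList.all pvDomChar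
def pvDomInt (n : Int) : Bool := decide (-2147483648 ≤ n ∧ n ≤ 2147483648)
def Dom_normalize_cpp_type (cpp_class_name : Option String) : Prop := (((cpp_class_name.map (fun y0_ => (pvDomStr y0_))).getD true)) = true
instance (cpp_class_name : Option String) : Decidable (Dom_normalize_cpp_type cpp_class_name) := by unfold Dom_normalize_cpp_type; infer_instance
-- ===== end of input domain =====

-- B replaces A's three replace-to-fixpoint loops by three single left-to-right scans
-- (collapse space runs; drop the space of "> >" / "< <" chains); objective: alternative.

-- ===== PORT A =====
-- A's inner `while True: s.replace(old, new)` loop, with fuel = |s|+1: every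
-- productive iteration of A's calls shrinks the string by at least one character
-- (new is shorter than old), so the fuel is never exhausted on A's three calls
-- (proved in the loop lemmas below); the recursion itself is A's, step for step.
def pvReplaceTillDoneGo (old new : String) : Nat → String → String
  | 0, s => s
  | Nat.succ fuel, s =>
    let n := PySem.Str.replace s old new
    if n = s then s else pvReplaceTillDoneGo old new fuel n

def pvReplaceTillDone (s old new : String) : String :=
  pvReplaceTillDoneGo old new (s.toList.length + 1) s

def normalize_cpp_type (cpp_class_name : Option String) : Option String :=
  match cpp_class_name with
  | none => none
  | some s =>
    let r1 := pvReplaceTillDone s "  " " "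
    let r2 := pvReplaceTillDone r1 "> >" ">>"
    let r3 := pvReplaceTillDone r2 "< <" "<<"
    some r3

-- ===== PORT B =====
-- Source B `_collapse_spaces`: one scan, a space whose successor is a space is dropped
def pvCollapse : List Char → List Char
  | c1 :: c2 :: t => if c1 = ' ' ∧ c2 = ' ' then pvCollapse (c2 :: t) else c1 :: pvCollapse (c2 :: t)
  | l => l
  termination_by l => l.length

-- Source B `_drop_between`: one scan, on "ch ' ' ch" emit ch and continue AT the second ch
def pvDropBetween (ch : Char) : List Char → List Char
  | c1 :: c2 :: c3 :: t =>
    if c1 = ch ∧ c2 = ' ' ∧ c3 = ch then ch :: pvDropBetween ch (c3 :: t)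
    else c1 :: pvDropBetween ch (c2 :: c3 :: t)
  | l => l
  termination_by l => l.length

def normalize_cpp_type_alt (cpp_class_name : Option String) : Option String :=
  match cpp_class_name with
  | none => none
  | some s =>
    some (String.ofList (pvDropBetween '<' (pvDropBetween '>' (pvCollapse s.toList))))

-- ===== PRECONDITION & SPEC =====
def Spec_normalize_cpp_type (cpp_class_name : Option String) (out : Option String) : Prop := out = normalize_cpp_type_alt cpp_class_name
instance (cpp_class_name : Option String) (out : Option String) : Decidable (Spec_normalize_cpp_type cpp_class_name out) := by unfold Spec_normalize_cpp_type; infer_instance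

-- ===== CLAIM (what is proved, stated in full; the proofs are below) =====
def Claim_equal_normalize_cpp_type : Prop := ∀ (cpp_class_name : Option String), Dom_normalize_cpp_type cpp_class_name → Spec_normalize_cpp_type cpp_class_name (normalize_cpp_type cpp_class_name)

-- ===== LEMMAS AND PROOFS =====

-- What one call of Python's s.replace computes, as a structural recursion:
-- pvRepS = one replace("  ", " ") pass, pvRepB ch = one replace(ch+" "+ch, ch+ch) pass.
def pvRepS : List Char → List Char
  | c1 :: c2 :: t => if c1 = ' ' ∧ c2 = ' ' then ' ' :: pvRepS t else c1 :: pvRepS (c2 :: t)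
  | l => l
  termination_by l => l.length

def pvRepB (ch : Char) : List Char → List Char
  | c1 :: c2 :: c3 :: t =>
    if c1 = ch ∧ c2 = ' ' ∧ c3 = ch then ch :: ch :: pvRepB ch t
    else c1 :: pvRepB ch (c2 :: c3 :: t)
  | l => l
  termination_by l => l.length

theorem go_eq_S : ∀ (fuel : Nat) (l acc : List Char), l.length ≤ fuel →
    PySem.Chars.replace.go [' ', ' '] [' '] fuel l acc = acc.reverse ++ pvRepS l := by
  intro fuel
  induction fuel with
  | zero =>
    intro l acc h
    have : l = [] := List.eq_nil_of_length_eq_zero (Nat.le_zero.mp h)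
    subst this
    simp [PySem.Chars.replace.go, pvRepS]
  | succ f ih =>
    intro l acc h
    match l with
    | [] => simp [PySem.Chars.replace.go, pvRepS]
    | [c] =>
      rw [PySem.Chars.replace.go]
      have : [' ', ' '].isPrefixOf [c] = false := by simp [List.isPrefixOf]
      simp only [this, Bool.false_eq_true, if_false]
      rw [ih [] (c :: acc) (by simp)]
      simp [pvRepS]
    | c1 :: c2 :: t =>
      rw [PySem.Chars.replace.go]
      by_cases h12 : c1 = ' ' ∧ c2 = ' '
      · obtain ⟨rfl, rfl⟩ := h12
        have hp : [' ', ' '].isPrefixOf (' ' :: ' ' :: t) = true := by simp [List.isPrefixOf]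
        simp only [hp, if_true]
        rw [show List.drop [' ',' '].length (' ' :: ' ' :: t) = t from rfl]
        rw [ih t _ (by simp at h ⊢; omega)]
        rw [pvRepS]
        simp
      · have hp : [' ', ' '].isPrefixOf (c1 :: c2 :: t) = false := by
          simp [List.isPrefixOf]
          intro h1 h2; exact h12 ⟨h1.symm, h2.symm⟩
        simp only [hp, Bool.false_eq_true, if_false]
        rw [ih (c2 :: t) _ (by simp at h ⊢; omega)]
        rw [pvRepS]
        simp [h12]

theorem go_eq_B (ch : Char) : ∀ (fuel : Nat) (l acc : List Char), l.length ≤ fuel →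
    PySem.Chars.replace.go [ch, ' ', ch] [ch, ch] fuel l acc = acc.reverse ++ pvRepB ch l := by
  intro fuel
  induction fuel with
  | zero =>
    intro l acc h
    have : l = [] := List.eq_nil_of_length_eq_zero (Nat.le_zero.mp h)
    subst this
    simp [PySem.Chars.replace.go, pvRepB]
  | succ f ih =>
    intro l acc h
    match l with
    | [] => simp [PySem.Chars.replace.go, pvRepB]
    | [c] =>
      rw [PySem.Chars.replace.go]
      have : [ch, ' ', ch].isPrefixOf [c] = false := by simp [List.isPrefixOf]
      simp only [this, Bool.false_eq_true, if_false]
      rw [ih [] (c :: acc) (by simp)]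
      simp [pvRepB]
    | [c1, c2] =>
      rw [PySem.Chars.replace.go]
      have : [ch, ' ', ch].isPrefixOf [c1, c2] = false := by simp [List.isPrefixOf]
      simp only [this, Bool.false_eq_true, if_false]
      rw [ih [c2] (c1 :: acc) (by simp at h ⊢; omega)]
      simp [pvRepB]
    | c1 :: c2 :: c3 :: t =>
      rw [PySem.Chars.replace.go]
      by_cases h123 : c1 = ch ∧ c2 = ' ' ∧ c3 = ch
      · have hp : [ch, ' ', ch].isPrefixOf (c1 :: c2 :: c3 :: t) = true := by
          simp [List.isPrefixOf, h123.1, h123.2.1, h123.2.2]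
        simp only [hp, if_true]
        rw [show List.drop [ch,' ',ch].length (c1 :: c2 :: c3 :: t) = t from rfl]
        rw [ih t _ (by simp at h ⊢; omega)]
        rw [pvRepB]
        simp [h123]
      · have hp : [ch, ' ', ch].isPrefixOf (c1 :: c2 :: c3 :: t) = false := by
          simp [List.isPrefixOf]
          intro h1 h2 h3; exact h123 ⟨h1.symm, h2.symm, h3.symm⟩
        simp only [hp, Bool.false_eq_true, if_false]
        rw [ih (c2 :: c3 :: t) _ (by simp at h ⊢; omega)]
        rw [pvRepB]
        simp [h123]

theorem replace_eq_S (l : List Char) : PySem.Chars.replace l [' ', ' '] [' '] = pvRepS l := by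
  rw [PySem.Chars.replace]
  simp [go_eq_S l.length l [] (le_refl _)]

theorem replace_eq_B (ch : Char) (l : List Char) :
    PySem.Chars.replace l [ch, ' ', ch] [ch, ch] = pvRepB ch l := by
  rw [PySem.Chars.replace]
  simp [go_eq_B ch l.length l [] (le_refl _)]

theorem repS_length_le (l : List Char) : (pvRepS l).length ≤ l.length := by
  fun_induction pvRepS l <;> simp_all <;> omega

theorem repB_length_le (ch : Char) (l : List Char) : (pvRepB ch l).length ≤ l.length := by
  fun_induction pvRepB ch l <;> simp_all <;> omega

theorem repS_eq_or_lt (l : List Char) : pvRepS l = l ∨ (pvRepS l).length < l.length := by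
  fun_induction pvRepS l with
  | case1 c1 c2 t h ih =>
    right
    have := repS_length_le t
    simp; omega
  | case2 c1 c2 t h ih =>
    rcases ih with h' | h'
    · left; simp [h']
    · right; simp only [List.length_cons] at h' ⊢; omega
  | case3 => left; rfl

theorem repB_eq_or_lt (ch : Char) (l : List Char) : pvRepB ch l = l ∨ (pvRepB ch l).length < l.length := by
  fun_induction pvRepB ch l with
  | case1 c1 c2 c3 t h ih =>
    right
    have := repB_length_le ch t
    simp; omega
  | case2 c1 c2 c3 t h ih =>
    rcases ih with h' | h'
    · left; simp [h']
    · right; simp only [List.length_cons] at h' ⊢; omega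
  | case3 => left; rfl

theorem head?_repS (l : List Char) : (pvRepS l).head? = l.head? := by
  fun_induction pvRepS l <;> simp_all

theorem head?_repB (ch : Char) (l : List Char) : (pvRepB ch l).head? = l.head? := by
  fun_induction pvRepB ch l <;> simp_all

theorem collapse_cons (c : Char) (x : List Char) :
    pvCollapse (c :: x) = if c = ' ' ∧ x.head? = some ' ' then pvCollapse x else c :: pvCollapse x := by
  cases x with
  | nil => simp [pvCollapse]
  | cons c2 t =>
    rw [pvCollapse]
    simp only [List.head?_cons, Option.some.injEq]

theorem fix_S (l : List Char) (h : pvRepS l = l) : pvCollapse l = l := by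
  fun_induction pvCollapse l with
  | case1 c1 c2 t hc ih =>
    exfalso
    rw [pvRepS, if_pos hc] at h
    obtain ⟨rfl, rfl⟩ := hc
    have h' : pvRepS t = ' ' :: t := by injection h
    have := repS_length_le t
    rw [h'] at this
    simp at this
  | case2 c1 c2 t hc ih =>
    rw [pvRepS, if_neg hc] at h
    have h' : pvRepS (c2 :: t) = c2 :: t := by injection h
    rw [ih h']
  | case3 l h1 => rfl

theorem inv_S (l : List Char) : pvCollapse (pvRepS l) = pvCollapse l := by
  fun_induction pvRepS l with
  | case1 c1 c2 t hc ih =>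
    obtain ⟨rfl, rfl⟩ := hc
    rw [collapse_cons, head?_repS, ih]
    rw [show pvCollapse (' ' :: ' ' :: t) = pvCollapse (' ' :: t) from by rw [pvCollapse]; simp]
    rw [collapse_cons]
  | case2 c1 c2 t hc ih =>
    rw [collapse_cons, head?_repS]
    simp only [List.head?_cons, Option.some.injEq]
    rw [if_neg hc, ih, pvCollapse, if_neg hc]
  | case3 l h1 => rfl

theorem fix_B (ch : Char) (hch : ch ≠ ' ') (l : List Char) (h : pvRepB ch l = l) :
    pvDropBetween ch l = l := by
  fun_induction pvDropBetween ch l with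
  | case1 c1 c2 c3 t hc ih =>
    exfalso
    rw [pvRepB, if_pos hc] at h
    rw [List.cons.injEq, List.cons.injEq] at h
    exact hch (h.2.1.trans hc.2.1)
  | case2 c1 c2 c3 t hc ih =>
    rw [pvRepB, if_neg hc] at h
    have h' : pvRepB ch (c2 :: c3 :: t) = c2 :: c3 :: t := by injection h
    rw [ih h']
  | case3 l h1 => rfl

-- micro-lemmas about single scans
theorem dropB_cons_ne (ch a : Char) (ha : a ≠ ch) (x : List Char) :
    pvDropBetween ch (a :: x) = a :: pvDropBetween ch x := by
  match x with
  | [] => simp [pvDropBetween]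
  | [b] => simp [pvDropBetween]
  | b :: c :: t =>
    rw [pvDropBetween, if_neg (by intro hc; exact ha hc.1)]

theorem dropB_ch_cons (ch : Char) (x : List Char) (hx : x.head? ≠ some ' ') :
    pvDropBetween ch (ch :: x) = ch :: pvDropBetween ch x := by
  match x with
  | [] => simp [pvDropBetween]
  | [b] => simp [pvDropBetween]
  | b :: c :: t =>
    rw [pvDropBetween, if_neg (by intro hc; exact hx (by simp [hc.2.1]))]

theorem dropB_pat (ch : Char) (t : List Char) :
    pvDropBetween ch (ch :: ' ' :: ch :: t) = ch :: pvDropBetween ch (ch :: t) := by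
  rw [pvDropBetween, if_pos ⟨rfl, rfl, rfl⟩]

theorem dropB_ch_sp (ch : Char) (hch : ch ≠ ' ') (x : List Char) (hx : x.head? ≠ some ch) :
    pvDropBetween ch (ch :: ' ' :: x) = ch :: ' ' :: pvDropBetween ch x := by
  match x with
  | [] => simp [pvDropBetween]
  | b :: t =>
    rw [pvDropBetween, if_neg (by intro hc; exact hx (by simp [hc.2.2]))]
    rw [dropB_cons_ne ch ' ' (Ne.symm hch)]

theorem repB_cons_ne (ch a : Char) (ha : a ≠ ch) (x : List Char) :
    pvRepB ch (a :: x) = a :: pvRepB ch x := by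
  match x with
  | [] => simp [pvRepB]
  | [b] => simp [pvRepB]
  | b :: c :: t =>
    rw [pvRepB, if_neg (by intro hc; exact ha hc.1)]

theorem repB_ch_cons (ch : Char) (x : List Char) (hx : x.head? ≠ some ' ') :
    pvRepB ch (ch :: x) = ch :: pvRepB ch x := by
  match x with
  | [] => simp [pvRepB]
  | [b] => simp [pvRepB]
  | b :: c :: t =>
    rw [pvRepB, if_neg (by intro hc; exact hx (by simp [hc.2.1]))]

theorem repB_ch_sp (ch : Char) (hch : ch ≠ ' ') (x : List Char) (hx : x.head? ≠ some ch) :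
    pvRepB ch (ch :: ' ' :: x) = ch :: ' ' :: pvRepB ch x := by
  match x with
  | [] => simp [pvRepB]
  | b :: t =>
    rw [pvRepB, if_neg (by intro hc; exact hx (by simp [hc.2.2]))]
    rw [repB_cons_ne ch ' ' (Ne.symm hch)]

theorem repB_pat (ch : Char) (t : List Char) :
    pvRepB ch (ch :: ' ' :: ch :: t) = ch :: ch :: pvRepB ch t := by
  rw [pvRepB, if_pos ⟨rfl, rfl, rfl⟩]

theorem TS_B (ch : Char) (hch : ch ≠ ' ') :
    ∀ (n : Nat) (x : List Char), x.length ≤ n →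
      pvDropBetween ch (pvRepB ch x) = pvDropBetween ch x ∧
      pvDropBetween ch (ch :: pvRepB ch x) = pvDropBetween ch (ch :: x) := by
  intro n
  induction n with
  | zero =>
    intro x hx
    have : x = [] := List.eq_nil_of_length_eq_zero (Nat.le_zero.mp hx)
    subst this
    exact ⟨by simp [pvRepB], by simp [pvRepB]⟩
  | succ n ihn =>
    intro x hx
    have hT : pvDropBetween ch (pvRepB ch x) = pvDropBetween ch x := by
      match x with
      | [] => simp [pvRepB]
      | a :: y =>
        by_cases ha : ch = a
        · subst ha
          match y with
          | [] => simp [pvRepB]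
          | b :: z =>
            by_cases hb : b = ' '
            · subst hb
              match z with
              | [] => simp [pvRepB]
              | c :: t =>
                by_cases hc : ch = c
                · subst hc
                  rw [repB_pat]
                  rw [dropB_ch_cons ch (ch :: pvRepB ch t) (by simp [hch])]
                  rw [dropB_pat]
                  rw [(ihn t (by simp at hx; omega)).2]
                · rw [repB_ch_sp ch hch (c :: t)
                      (by simp only [List.head?_cons]; exact fun h => hc (Option.some.inj h).symm)]
                  rw [dropB_ch_sp ch hch (pvRepB ch (c :: t))
                      (by rw [head?_repB]; simp only [List.head?_cons]; exact fun h => hc (Option.some.inj h).symm)]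
                  rw [dropB_ch_sp ch hch (c :: t)
                      (by simp only [List.head?_cons]; exact fun h => hc (Option.some.inj h).symm)]
                  rw [(ihn (c :: t) (by simp at hx ⊢; omega)).1]
            · rw [repB_ch_cons ch (b :: z) (by simp [hb])]
              rw [dropB_ch_cons ch (pvRepB ch (b :: z)) (by rw [head?_repB]; simp [hb])]
              rw [dropB_ch_cons ch (b :: z) (by simp [hb])]
              rw [(ihn (b :: z) (by simp at hx ⊢; omega)).1]
        · rw [repB_cons_ne ch a (Ne.symm ha)]
          rw [dropB_cons_ne ch a (Ne.symm ha), dropB_cons_ne ch a (Ne.symm ha)]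
          rw [(ihn y (by simp at hx; omega)).1]
    refine ⟨hT, ?_⟩
    match x with
    | [] => simp [pvRepB]
    | b :: y =>
      by_cases hb : b = ' '
      · subst hb
        match y with
        | [] => simp [pvRepB]
        | c :: z =>
          by_cases hc : ch = c
          · subst hc
            rw [repB_cons_ne ch ' ' (Ne.symm hch)]
            match z with
            | [] => simp [pvRepB]
            | d :: w =>
              by_cases hd : d = ' '
              · subst hd
                match w with
                | [] => simp [pvRepB]
                | e :: v =>
                  by_cases he : ch = e
                  · subst he
                    rw [repB_pat]
                    rw [dropB_pat]
                    rw [dropB_ch_cons ch (ch :: pvRepB ch v) (by simp [hch])]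
                    rw [(ihn v (by simp at hx; omega)).2]
                    rw [dropB_pat, dropB_pat]
                  · rw [repB_ch_sp ch hch (e :: v)
                        (by simp only [List.head?_cons]; exact fun h => he (Option.some.inj h).symm)]
                    rw [dropB_pat]
                    rw [dropB_ch_sp ch hch (pvRepB ch (e :: v))
                        (by rw [head?_repB]; simp only [List.head?_cons]; exact fun h => he (Option.some.inj h).symm)]
                    rw [(ihn (e :: v) (by simp at hx ⊢; omega)).1]
                    rw [dropB_pat]
                    rw [dropB_ch_sp ch hch (e :: v)
                        (by simp only [List.head?_cons]; exact fun h => he (Option.some.inj h).symm)]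
              · rw [repB_ch_cons ch (d :: w) (by simp [hd])]
                rw [dropB_pat]
                rw [(ihn (d :: w) (by simp at hx ⊢; omega)).2]
                rw [dropB_pat]
          · rw [repB_cons_ne ch ' ' (Ne.symm hch)]
            rw [dropB_ch_sp ch hch (pvRepB ch (c :: z))
                (by rw [head?_repB]; simp only [List.head?_cons]; exact fun h => hc (Option.some.inj h).symm)]
            rw [(ihn (c :: z) (by simp at hx ⊢; omega)).1]
            rw [dropB_ch_sp ch hch (c :: z)
                (by simp only [List.head?_cons]; exact fun h => hc (Option.some.inj h).symm)]
      · rw [dropB_ch_cons ch (pvRepB ch (b :: y)) (by rw [head?_repB]; simp [hb])]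
        rw [dropB_ch_cons ch (b :: y) (by simp [hb])]
        rw [hT]


theorem inv_B (ch : Char) (hch : ch ≠ ' ') (l : List Char) :
    pvDropBetween ch (pvRepB ch l) = pvDropBetween ch l :=
  (TS_B ch hch l.length l (le_refl _)).1

theorem loop_S : ∀ (fuel : Nat) (s : String), s.toList.length < fuel →
    (pvReplaceTillDoneGo "  " " " fuel s).toList = pvCollapse s.toList := by
  intro fuel
  induction fuel with
  | zero => intro s h; omega
  | succ f ih =>
    intro s h
    have hlist : (PySem.Str.replace s "  " " ").toList = pvRepS s.toList := by
      rw [PySem.Str.replace, String.toList_ofList]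
      exact replace_eq_S _
    rw [pvReplaceTillDoneGo]
    by_cases hn : PySem.Str.replace s "  " " " = s
    · rw [if_pos hn]
      have : pvRepS s.toList = s.toList := by
        rw [← hlist, hn]
      exact (fix_S s.toList this).symm
    · rw [if_neg hn]
      have hlt : (PySem.Str.replace s "  " " ").toList.length < s.toList.length := by
        rw [hlist]
        rcases repS_eq_or_lt s.toList with he | hl
        · exact absurd (String.toList_inj.mp (hlist.trans he)) hn
        · exact hl
      rw [ih _ (by omega), hlist, inv_S]

theorem loop_B (ch : Char) (hch : ch ≠ ' ') (old new : String)
    (hold : old.toList = [ch, ' ', ch]) (hnew : new.toList = [ch, ch]) :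
    ∀ (fuel : Nat) (s : String), s.toList.length < fuel →
    (pvReplaceTillDoneGo old new fuel s).toList = pvDropBetween ch s.toList := by
  intro fuel
  induction fuel with
  | zero => intro s h; omega
  | succ f ih =>
    intro s h
    have hlist : (PySem.Str.replace s old new).toList = pvRepB ch s.toList := by
      rw [PySem.Str.replace, String.toList_ofList, hold, hnew]
      exact replace_eq_B ch _
    rw [pvReplaceTillDoneGo]
    by_cases hn : PySem.Str.replace s old new = s
    · rw [if_pos hn]
      have : pvRepB ch s.toList = s.toList := by
        rw [← hlist, hn]
      exact (fix_B ch hch s.toList this).symm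
    · rw [if_neg hn]
      have hlt : (PySem.Str.replace s old new).toList.length < s.toList.length := by
        rw [hlist]
        rcases repB_eq_or_lt ch s.toList with he | hl
        · exact absurd (String.toList_inj.mp (hlist.trans he)) hn
        · exact hl
      rw [ih _ (by omega), hlist, inv_B ch hch]

-- ===== VERDICT (by name: the statement is the Claim_ definition above) =====
theorem normalize_cpp_type_spec : Claim_equal_normalize_cpp_type := by
  have h1 : ∀ s : String, (pvReplaceTillDone s "  " " ").toList = pvCollapse s.toList := by
    intro s; rw [pvReplaceTillDone]; exact loop_S _ _ (Nat.lt_succ_self _)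
  have h2 : ∀ s : String, (pvReplaceTillDone s "> >" ">>").toList = pvDropBetween '>' s.toList := by
    intro s; rw [pvReplaceTillDone]; exact loop_B '>' (by decide) "> >" ">>" rfl rfl _ _ (Nat.lt_succ_self _)
  have h3 : ∀ s : String, (pvReplaceTillDone s "< <" "<<").toList = pvDropBetween '<' s.toList := by
    intro s; rw [pvReplaceTillDone]; exact loop_B '<' (by decide) "< <" "<<" rfl rfl _ _ (Nat.lt_succ_self _)
  intro o _
  unfold Spec_normalize_cpp_type normalize_cpp_type normalize_cpp_type_alt
  cases o with
  | none => rfl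
  | some s =>
    simp only
    refine congrArg some ?_
    apply String.toList_inj.mp
    rw [String.toList_ofList, h3, h2, h1]
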